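-- pv_equiv track=rewrite | github.com/vlad526/Lab | KI305/Shustakevych/Lab7/main.py | lengthOfEachSubArray
-- ===== SOURCE A (Python) =====
-- def lengthOfEachSubArray(size):
--     arr = [None] * size
--
--     for i in range(size):
--         length = 0
--         for j in range(size):
--             if j <= size - i - 1:
--                 length += 1
--         arr[i] = [""] * length
--
--     return arr
-- ===== SOURCE B (Python) =====
-- def lengthOfEachSubArray(size):
--     return [[""] * (size - i) for i in range(size)]
-- ===== Notes on version B (the rewrite author's own statement) =====
-- stated objective: simpler
-- what changed: Each sublist's length is computed in closed form as size - i, eliminating A's inner O(n) counting loop and the mutable pre-allocated array.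
import Mathlib
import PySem

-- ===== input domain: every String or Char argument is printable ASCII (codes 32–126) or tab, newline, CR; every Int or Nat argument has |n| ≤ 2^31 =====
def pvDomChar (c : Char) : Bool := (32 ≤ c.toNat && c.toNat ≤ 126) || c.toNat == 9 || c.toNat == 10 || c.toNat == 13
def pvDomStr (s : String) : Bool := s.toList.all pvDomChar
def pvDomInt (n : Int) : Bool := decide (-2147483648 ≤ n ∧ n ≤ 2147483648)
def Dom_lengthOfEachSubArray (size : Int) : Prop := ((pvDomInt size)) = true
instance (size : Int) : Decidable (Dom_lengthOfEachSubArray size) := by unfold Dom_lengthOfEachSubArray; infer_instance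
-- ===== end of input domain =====

-- B replaces A's inner counting loop by the closed-form sublist length size - i (simpler; same return value).

-- ===== PORT A =====
-- arr = [None] * size is ported as a list of Option; the loop writes some _ at every
-- index 0..size-1 (each i in range(size) is in range for arr), so the final extraction
-- (·.getD []) never sees a none on an index the loop left; i ≥ 0 so i.toNat is exact.
def lengthOfEachSubArray (size : Int) : List (List String) :=
  let arr0 : List (Option (List String)) := List.replicate size.toNat none
  let arr := (PySem.List.pyRange 0 size 1).foldl
    (fun arr i =>
      let length := (PySem.List.pyRange 0 size 1).foldl
        (fun l j => if j ≤ size - i - 1 then l + 1 else l) (0 : Int)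
      arr.set i.toNat (some (List.replicate length.toNat "")))
    arr0
  arr.map (fun o => o.getD [])

-- ===== PORT B =====
def lengthOfEachSubArray_alt (size : Int) : List (List String) :=
  (PySem.List.pyRange 0 size 1).map (fun i => List.replicate (size - i).toNat "")

-- ===== PRECONDITION & SPEC =====
def Spec_lengthOfEachSubArray (size : Int) (out : List (List String)) : Prop := out = lengthOfEachSubArray_alt size
instance (size : Int) (out : List (List String)) : Decidable (Spec_lengthOfEachSubArray size out) := by unfold Spec_lengthOfEachSubArray; infer_instance

-- ===== CLAIM (what is proved, stated in full; the proofs are below) =====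
def Claim_equal_lengthOfEachSubArray : Prop := ∀ (size : Int), Dom_lengthOfEachSubArray size → Spec_lengthOfEachSubArray size (lengthOfEachSubArray size)

-- ===== LEMMAS AND PROOFS =====

-- A's inner loop is a conditional count: foldl over any list adds countP.
theorem pv_foldl_count (c : Int) :
    ∀ (L : List Int) (s : Int),
      L.foldl (fun l j => if j ≤ c then l + 1 else l) s = s + (L.countP (fun j => j ≤ c) : Int) := by
  intro L
  induction L with
  | nil => intro s; simp
  | cons x xs ih =>
      intro s
      simp only [List.foldl_cons, List.countP_cons, ih]
      by_cases h : x ≤ c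
      · simp [h]; push_cast; ring
      · simp [h]

-- counting j ∈ [0, b) with j ≤ c, for 0 ≤ c < b, gives c + 1.
theorem pv_countP_pyRange (b c : Int) (h0 : 0 ≤ c) (hb : c < b) :
    ((PySem.List.pyRange 0 b 1).countP (fun j => j ≤ c)) = (c + 1).toNat := by
  rw [PySem.List.pyRange_one_append 0 (c + 1) b (by omega) (by omega), List.countP_append]
  have h1 : (PySem.List.pyRange 0 (c + 1) 1).countP (fun j => j ≤ c)
      = (PySem.List.pyRange 0 (c + 1) 1).length := by
    apply List.countP_eq_length.mpr
    intro a ha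
    have := (PySem.List.mem_pyRange_one).mp ha
    simp; omega
  have h2 : (PySem.List.pyRange (c + 1) b 1).countP (fun j => j ≤ c) = 0 := by
    apply List.countP_eq_zero.mpr
    intro a ha
    have := (PySem.List.mem_pyRange_one).mp ha
    simp; omega
  rw [h1, h2, PySem.List.length_pyRange_one]
  omega

-- A's outer loop: folding index-wise set over range k..k+m on an array of length k+m
-- leaves the first k entries and writes g at each later index.
theorem pv_foldl_set {α : Type} (g : Int → α) :
    ∀ (m k : Nat) (init : List α), init.length = k + m →
      (PySem.List.pyRange (k : Int) ((k : Int) + (m : Int)) 1).foldl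
          (fun arr i => arr.set i.toNat (g i)) init
        = init.take k ++ (List.range m).map (fun j => g ((k + j : Nat) : Int)) := by
  intro m
  induction m with
  | zero =>
      intro k init hlen
      rw [PySem.List.pyRange_one_eq_nil (by omega)]
      simp [List.take_of_length_le (by omega : init.length ≤ k)]
  | succ m ih =>
      intro k init hlen
      rw [PySem.List.pyRange_one_cons (by push_cast; omega)]
      simp only [List.foldl_cons]
      have hset : ((k : Int)).toNat = k := by omega
      rw [hset]
      have hcast : (k : Int) + 1 = ((k + 1 : Nat) : Int) := by push_cast; ring
      have hcast2 : (k : Int) + ((m + 1 : Nat) : Int) = ((k + 1 : Nat) : Int) + ((m : Nat) : Int) := by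
        push_cast; ring
      rw [hcast2, hcast]
      rw [ih (k + 1) (init.set k (g k)) (by simp [hlen]; omega)]
      have hk : k < init.length := by omega
      rw [List.set_eq_take_append_cons_drop, if_pos hk]
      have htk : ((init.take k ++ g (k : Int) :: init.drop (k + 1)).take (k + 1))
          = init.take k ++ [g (k : Int)] := by
        rw [show k + 1 = (init.take k).length + 1 by simp [List.length_take]; omega]
        rw [List.take_append]
        simp
      rw [htk, List.range_succ_eq_map, List.map_cons, List.map_map]
      simp only [List.append_assoc, List.cons_append, List.nil_append, Nat.add_zero]
      congr 1
      congr 1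
      apply List.map_congr_left
      intro j _
      simp only [Function.comp_apply]
      congr 1
      omega

theorem lengthOfEachSubArray_eq (size : Int) :
    lengthOfEachSubArray size = lengthOfEachSubArray_alt size := by
  by_cases hs : size ≤ 0
  · simp [lengthOfEachSubArray, lengthOfEachSubArray_alt,
      PySem.List.pyRange_one_eq_nil hs, Int.toNat_of_nonpos hs]
  · rw [not_le] at hs
    unfold lengthOfEachSubArray lengthOfEachSubArray_alt
    simp only []
    have hrange : (PySem.List.pyRange 0 size 1)
        = PySem.List.pyRange ((0 : Nat) : Int) (((0 : Nat) : Int) + ((size.toNat : Nat) : Int)) 1 := by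
      simp [Int.toNat_of_nonneg (le_of_lt hs)]
    rw [show ((PySem.List.pyRange 0 size 1).foldl
        (fun arr i =>
          let length := (PySem.List.pyRange 0 size 1).foldl
            (fun l j => if j ≤ size - i - 1 then l + 1 else l) (0 : Int)
          arr.set i.toNat (some (List.replicate length.toNat "")))
        (List.replicate size.toNat none))
      = ((PySem.List.pyRange ((0:Nat):Int) (((0:Nat):Int) + ((size.toNat : Nat):Int)) 1).foldl
        (fun arr i => arr.set i.toNat
          (some (List.replicate ((PySem.List.pyRange 0 size 1).foldl
            (fun l j => if j ≤ size - i - 1 then l + 1 else l) (0 : Int)).toNat "")))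
        (List.replicate size.toNat none)) from by rw [← hrange]]
    rw [pv_foldl_set
        (fun i => some (List.replicate ((PySem.List.pyRange 0 size 1).foldl
            (fun l j => if j ≤ size - i - 1 then l + 1 else l) (0 : Int)).toNat ""))
        size.toNat 0 _ (by simp)]
    simp only [List.take_zero, List.nil_append, List.map_map, Nat.zero_add]
    rw [PySem.List.pyRange_one]
    simp only [List.map_map, Int.sub_zero]
    apply List.map_congr_left
    intro j hj
    have hjlt : j < size.toNat := List.mem_range.mp hj
    have hjs : (j : Int) < size := by omega
    simp only [Function.comp_apply, Option.getD_some, zero_add]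
    congr 1
    have hmr : List.map (fun k : Nat => (k : Int)) (List.range size.toNat)
        = PySem.List.pyRange 0 size 1 := by
      rw [PySem.List.pyRange_one]; simp
    rw [hmr, pv_foldl_count, pv_countP_pyRange size (size - (j : Int) - 1) (by omega) (by omega)]
    omega

-- ===== VERDICT (by name: the statement is the Claim_ definition above) =====
theorem lengthOfEachSubArray_spec : Claim_equal_lengthOfEachSubArray := by
  intro size _
  exact lengthOfEachSubArray_eq size
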